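-- pv_equiv track=rewrite | github.com/JumiHsu/HeadFirst_python | Simon_discuss_01/Simon_discuss_01_rewrite05.py | methodBin
-- ===== SOURCE A (Python) =====
-- def calculate_fn(anyList):
--
--     length = len(anyList)
--     fn ,index = 0 ,0
--     while index < length:
--         fn += 2**anyList[index]
--         index += 1
--
--     return fn ,length
--
-- def methodBin(inputList):
--
--     fn ,length = calculate_fn(inputList)
--     B2=[]
--     fnBin = bin(fn)[2:]                 # 轉二進位，前面一定會加上 0b
--
--     j=0
--     for power in range(len(fnBin)-1,-1,-1):  # fnBin=1101，最高位數 = len(fnBin)-1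
--                                              # power=[3 2 1 0]表2進位之次方list
--         if int(fnBin[j]) != 0:          # 從 fnBin第0位 開始找，若不等於0(即=1)
--             B2.append(power)             # 就把 次方向量power 放入 C
--             j += 1                      # 找完就找下一位
--
--         else:
--             j += 1                      # 等於0，沒事，下一位
--
--     fn_Bin ,lengthB2 = calculate_fn(B2)
--
--     return B2 ,fn_Bin ,lengthB2
-- ===== SOURCE B (Python) =====
-- def methodBin(inputList):
--     fn = 0
--     for x in inputList:
--         fn += 2 ** x
--     bits = []
--     f, i = fn, 0
--     while f:
--         if f & 1:
--             bits.append(i)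
--         f >>= 1
--         i += 1
--     B2 = bits[::-1]
--     return B2, fn, len(B2)
-- ===== Notes on version B (the rewrite author's own statement) =====
-- stated objective: idiomatic
-- what changed: Replaces the bin()-string character scan (and the redundant re-summation of the bit positions) with a direct integer bit-shift extraction of the set-bit positions, returning fn and the popcount directly.
import Mathlib
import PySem

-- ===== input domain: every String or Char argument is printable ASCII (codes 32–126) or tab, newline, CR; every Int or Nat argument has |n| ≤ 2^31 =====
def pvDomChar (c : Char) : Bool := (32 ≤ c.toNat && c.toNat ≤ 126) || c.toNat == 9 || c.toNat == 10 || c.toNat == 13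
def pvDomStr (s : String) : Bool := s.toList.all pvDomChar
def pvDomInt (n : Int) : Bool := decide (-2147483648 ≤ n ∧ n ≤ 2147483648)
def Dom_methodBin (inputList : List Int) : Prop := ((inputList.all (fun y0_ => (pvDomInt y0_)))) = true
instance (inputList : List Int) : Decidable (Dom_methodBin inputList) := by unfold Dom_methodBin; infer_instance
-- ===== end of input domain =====

-- B replaces A's bin()-string character scan (and its re-summation of the bit positions)
-- with a direct bit-shift extraction of the set-bit positions; same cost, more idiomatic.


-- ===== PORT A =====
-- the 'while index < length' loop is the fold over the index range 0..length-1;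
-- `2 ** anyList[index]` is exact for nonnegative elements (Pre_; a negative exponent
-- makes Python's fn a float and bin(fn) raise TypeError)
def calculateFn (anyList : List Int) : Int × Int :=
  let length : Int := PySem.List.len anyList
  let fn : Int := (PySem.List.pyRange 0 length).foldl
      (fun fn index => fn + 2 ^ (PySem.List.pyGetD anyList index 0).toNat) 0
  (fn, length)

-- bin(n)[2:] for n > 0, as the list of binary digits, most significant first (exact for n ≥ 0)
def binDigits (n : Nat) : List Nat :=
  if n = 0 then [] else binDigits (n / 2) ++ [n % 2]
  decreasing_by exact Nat.div_lt_self (Nat.pos_of_ne_zero (by assumption)) (by omega)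

def methodBin (inputList : List Int) : List Int × Int × Int :=
  let p := calculateFn inputList
  let fn := p.1
  -- fnBin = bin(fn)[2:]; bin(0)[2:] = "0"  (exact for fn ≥ 0, which Pre_ guarantees)
  let fnBin : List Nat := if fn.toNat = 0 then [0] else binDigits fn.toNat
  -- for power in range(len(fnBin)-1, -1, -1): j indexes fnBin, int(fnBin[j]) is the digit
  let r := (PySem.List.pyRange ((fnBin.length : Int) - 1) (-1) (-1)).foldl
      (fun (st : List Int × Nat) power =>
        if fnBin.getD st.2 0 ≠ 0 then (st.1 ++ [power], st.2 + 1) else (st.1, st.2 + 1))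
      ([], 0)
  let B2 := r.1
  let q := calculateFn B2
  (B2, q.1, q.2)

-- ===== PORT B =====
-- fn = 0; for x in inputList: fn += 2 ** x   (exact for nonnegative elements, see Pre_)
def sumPow (inputList : List Int) : Int :=
  inputList.foldl (fun fn x => fn + 2 ^ x.toNat) 0

-- while f: if f & 1: bits.append(i); f >>= 1; i += 1   (f ≥ 0: f & 1 is f % 2, f >> 1 is f / 2)
def ascBits (f : Nat) (i : Int) : List Int :=
  if f = 0 then [] else (if f % 2 = 1 then [i] else []) ++ ascBits (f / 2) (i + 1)
  decreasing_by exact Nat.div_lt_self (Nat.pos_of_ne_zero (by assumption)) (by omega)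

def methodBin_alt (inputList : List Int) : List Int × Int × Int :=
  let fn := sumPow inputList
  let B2 := (ascBits fn.toNat 0).reverse
  (B2, fn, (B2.length : Int))

-- ===== PRECONDITION & SPEC =====
-- Pre_ excludes lists with a negative element: there Python's `2 ** x` is a float, so
-- bin(fn) in A (and f & 1 in B) raises TypeError.
def Pre_methodBin (inputList : List Int) : Prop := ∀ x ∈ inputList, 0 ≤ x
instance (inputList : List Int) : Decidable (Pre_methodBin inputList) := by unfold Pre_methodBin; infer_instance
def pvWitness_methodBin : List Int := ([0, 1, 5] : List Int)

def Spec_methodBin (inputList : List Int) (out : List Int × Int × Int) : Prop := out = methodBin_alt inputList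
instance (inputList : List Int) (out : List Int × Int × Int) : Decidable (Spec_methodBin inputList out) := by unfold Spec_methodBin; infer_instance

-- ===== CLAIM (what is proved, stated in full; the proofs are below) =====
def Claim_equal_methodBin : Prop := ∀ (inputList : List Int), Dom_methodBin inputList → Pre_methodBin inputList → Spec_methodBin inputList (methodBin inputList)

-- ===== LEMMAS AND PROOFS =====

-- the index loop of calculateFn is the element fold
theorem calculateFn_fst (l : List Int) :
    (calculateFn l).1 = (l.map (fun x => (2:Int) ^ x.toNat)).sum := by
  have h := PySem.List.foldl_pyRange_pyGetD l 0
      (fun (fn x : Int) => fn + 2 ^ x.toNat) (0 : Int) (a := 0) le_rfl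
  rw [Int.toNat_zero, List.drop_zero] at h
  have h2 : (calculateFn l).1 = List.foldl (fun (fn x : Int) => fn + 2 ^ x.toNat) 0 l := h
  rw [h2, PySem.List.foldl_add, zero_add]

theorem calculateFn_snd (l : List Int) : (calculateFn l).2 = (l.length : Int) := by
  simp [calculateFn, PySem.List.len]

theorem sumPow_eq (l : List Int) :
    sumPow l = (l.map (fun x => (2:Int) ^ x.toNat)).sum := by
  simp [sumPow, PySem.List.foldl_add]

theorem sumPow_nonneg (l : List Int) : 0 ≤ sumPow l := by
  rw [sumPow_eq]
  apply List.sum_nonneg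
  intro x hx
  simp only [List.mem_map] at hx
  obtain ⟨y, _, rfl⟩ := hx
  positivity

-- the pure meaning of A's digit scan: digits paired with descending powers, keep the 1s
def scanD (ds : List Nat) (p : Int) : List Int :=
  match ds with
  | [] => []
  | d :: t => (if d ≠ 0 then [p] else []) ++ scanD t (p - 1)

theorem scanD_append (xs ys : List Nat) (p : Int) :
    scanD (xs ++ ys) p = scanD xs p ++ scanD ys (p - xs.length) := by
  induction xs generalizing p with
  | nil => simp [scanD]
  | cons d t ih =>
    simp only [List.cons_append, scanD, ih, List.append_assoc, List.length_cons]
    congr 2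
    push_cast
    ring_nf

-- descending range cons lemma (pyRange with step -1 down to -1)
theorem pyRange_down_cons (k : Nat) :
    PySem.List.pyRange (k : Int) (-1) (-1) = (k : Int) :: PySem.List.pyRange ((k : Int) - 1) (-1) (-1) := by
  simp only [PySem.List.pyRange]
  norm_num
  rcases Nat.eq_zero_or_pos k with rfl | hk
  · decide
  · rw [if_pos (by omega : (-1 : Int) < (k : Int)), if_pos hk, List.range_succ_eq_map,
      List.map_cons, List.map_map]
    congr 1
    apply List.map_congr_left
    intro a _
    simp only [Function.comp_apply, Nat.succ_eq_add_one]
    push_cast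
    ring

-- A's scan loop, characterised: fold over the descending power range = scanD of the digit suffix
theorem loopA_eq (fnBin : List Nat) (k : Nat) :
    ∀ (acc : List Int) (j : Nat), j + k = fnBin.length →
    (PySem.List.pyRange ((k : Int) - 1) (-1) (-1)).foldl
      (fun (st : List Int × Nat) power =>
        if fnBin.getD st.2 0 ≠ 0 then (st.1 ++ [power], st.2 + 1) else (st.1, st.2 + 1))
      (acc, j)
    = (acc ++ scanD (fnBin.drop j) ((k : Int) - 1), fnBin.length) := by
  induction k with
  | zero =>
    intro acc j hj
    have : PySem.List.pyRange ((0 : Nat) - 1 : Int) (-1) (-1) = [] := by decide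
    simp only [Nat.cast_zero] at this ⊢
    rw [this]
    simp [List.drop_of_length_le (by omega : fnBin.length ≤ j), scanD, hj.symm]
  | succ k ih =>
    intro acc j hj
    have hcast : ((k + 1 : Nat) : Int) - 1 = (k : Int) := by push_cast; ring
    rw [hcast, pyRange_down_cons k]
    have hjlt : j < fnBin.length := by omega
    rw [List.foldl_cons]
    have hdrop : fnBin.drop j = fnBin[j] :: fnBin.drop (j + 1) := List.drop_eq_getElem_cons hjlt
    have hget : fnBin.getD j 0 = fnBin[j] := List.getD_eq_getElem fnBin 0 hjlt
    by_cases hd : fnBin[j] ≠ 0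
    · simp only [hget, hd, if_pos, ne_eq, not_false_iff]
      rw [ih (acc ++ [(k : Int)]) (j + 1) (by omega)]
      rw [hdrop]
      simp [scanD, hd]
    · rw [ne_eq, not_not] at hd
      simp only [hget, hd, ne_eq, not_true_eq_false, if_false]
      rw [ih acc (j + 1) (by omega)]
      rw [hdrop]
      simp [scanD, hd]

-- binDigits unfolding equations
theorem binDigits_zero : binDigits 0 = [] := by rw [binDigits]; simp
theorem binDigits_pos {n : Nat} (h : n ≠ 0) : binDigits n = binDigits (n / 2) ++ [n % 2] := by
  rw [binDigits]; simp [h]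

theorem ascBits_zero (i : Int) : ascBits 0 i = [] := by rw [ascBits]; simp
theorem ascBits_pos {n : Nat} (h : n ≠ 0) (i : Int) :
    ascBits n i = (if n % 2 = 1 then [i] else []) ++ ascBits (n / 2) (i + 1) := by
  rw [ascBits]; simp [h]

-- the heart: A's msb-first digit scan equals the reverse of B's lsb-first extraction
theorem scan_binDigits (n : Nat) :
    ∀ p : Int, scanD (binDigits n) (((binDigits n).length : Int) - 1 + p) = (ascBits n p).reverse := by
  induction n using Nat.strong_induction_on with
  | _ n ih =>
    intro p
    by_cases h : n = 0
    · subst h; simp [binDigits_zero, ascBits_zero, scanD]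
    · rw [binDigits_pos h, ascBits_pos h, scanD_append]
      have L := (binDigits (n / 2)).length
      have hlen : (((binDigits (n / 2) ++ [n % 2]).length : Int)) = ((binDigits (n / 2)).length : Int) + 1 := by
        simp
      rw [hlen]
      have harg : ((binDigits (n / 2)).length : Int) + 1 - 1 + p
          = ((binDigits (n / 2)).length : Int) - 1 + (p + 1) := by ring
      rw [harg, ih (n / 2) (Nat.div_lt_self (Nat.pos_of_ne_zero h) (by omega)) (p + 1)]
      have harg2 : ((binDigits (n / 2)).length : Int) - 1 + (p + 1) - ((binDigits (n / 2)).length : Int) = p := by ring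
      rw [List.reverse_append]
      rcases Nat.mod_two_eq_zero_or_one n with h2 | h2 <;>
        simp [scanD, h2]

-- B2 as A computes it equals B2 as B computes it
theorem B2_eq (fn : Int) :
    (let fnBin : List Nat := if fn.toNat = 0 then [0] else binDigits fn.toNat
     ((PySem.List.pyRange ((fnBin.length : Int) - 1) (-1) (-1)).foldl
      (fun (st : List Int × Nat) power =>
        if fnBin.getD st.2 0 ≠ 0 then (st.1 ++ [power], st.2 + 1) else (st.1, st.2 + 1))
      ([], 0)).1)
    = (ascBits fn.toNat 0).reverse := by
  by_cases h : fn.toNat = 0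
  · simp only [h, if_true, List.length_cons, List.length_nil, ascBits_zero,
      List.reverse_nil]
    have h1 := loopA_eq [0] 1 [] 0 (by simp)
    norm_num at h1 ⊢
    rw [h1]
    simp [scanD]
  · simp only [h, if_false]
    have h1 := loopA_eq (binDigits fn.toNat) (binDigits fn.toNat).length [] 0 (by omega)
    rw [h1]
    have h2 := scan_binDigits fn.toNat 0
    rw [add_zero] at h2
    simpa using h2

-- re-summing the bit positions of n gives back n (times 2^p for the offset)
theorem sum_ascBits (n : Nat) :
    ∀ p : Nat, ((ascBits n (p : Int)).map (fun x => (2:Int) ^ x.toNat)).sum = (n : Int) * 2 ^ p := by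
  induction n using Nat.strong_induction_on with
  | _ n ih =>
    intro p
    by_cases h : n = 0
    · subst h; simp [ascBits_zero]
    · rw [ascBits_pos h]
      have hc : ((p : Int) + 1) = ((p + 1 : Nat) : Int) := by push_cast; ring
      rw [hc, List.map_append, List.sum_append,
        ih (n / 2) (Nat.div_lt_self (Nat.pos_of_ne_zero h) (by omega)) (p + 1)]
      have hn : n = 2 * (n / 2) + n % 2 := by omega
      rcases Nat.mod_two_eq_zero_or_one n with h2 | h2 <;>
      · simp only [h2]
        norm_num
        nth_rewrite 2 [hn]
        rw [h2]
        push_cast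
        ring

-- ===== VERDICT (by name: the statement is the Claim_ definition above) =====
theorem methodBin_spec : Claim_equal_methodBin := by
  intro l _ _
  unfold Spec_methodBin
  show methodBin l = methodBin_alt l
  unfold methodBin methodBin_alt
  simp only []
  have hfn : (calculateFn l).1 = sumPow l := by rw [calculateFn_fst, sumPow_eq]
  rw [hfn]
  set fn := sumPow l with hfndef
  have hB2 := B2_eq fn
  simp only [] at hB2
  rw [hB2]
  refine Prod.ext rfl (Prod.ext ?_ ?_)
  · -- fn_Bin = fn
    show (calculateFn ((ascBits fn.toNat 0).reverse)).1 = fn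
    rw [calculateFn_fst, List.map_reverse, List.sum_reverse]
    have := sum_ascBits fn.toNat 0
    simp only [Nat.cast_zero, pow_zero, mul_one] at this
    rw [this]
    have : 0 ≤ fn := sumPow_nonneg l
    omega
  · -- lengthB2 = len(B2)
    show (calculateFn ((ascBits fn.toNat 0).reverse)).2 = _
    rw [calculateFn_snd]
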